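-- pv_equiv track=rewrite | github.com/ebikdeli/nebula-python | sitemap_reader/url_parsers.py | _second_layer_product_url_filter
-- ===== SOURCE A (Python) =====
-- def _second_layer_product_url_filter(url:str) -> bool:
--     """If _is_product_url is True, get through this layer"""
--     filter_list = ['login', 'signup', 'account', 'about-us',
--                    'about', 'contact-us', 'contact', 'faq',
--                    'discount', 'privacy' , 'payment', 'policy',
--                    'w3.org', '.jpg', '.png', '.webp', '.org']
--     result = [elem for elem in filter_list if (elem in url)]
--     if bool(result):
--         return False
--     return True
-- ===== SOURCE B (Python) =====
-- _FILTER_WORDS = ['login', 'signup', 'account', 'about-us',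
--                  'about', 'contact-us', 'contact', 'faq',
--                  'discount', 'privacy', 'payment', 'policy',
--                  'w3.org', '.jpg', '.png', '.webp', '.org']
--
--
-- def _second_layer_product_url_filter(url: str) -> bool:
--     """If _is_product_url is True, get through this layer"""
--     # Invert the traversal: instead of searching the URL once per blacklist
--     # word, group the words by length, collect every window of the URL of each
--     # such length into a hash set, and test set intersection.
--     by_len = {}
--     for w in _FILTER_WORDS:
--         by_len.setdefault(len(w), set()).add(w)
--     for length, words in by_len.items():
--         windows = {url[i:i + length] for i in range(len(url) - length + 1)}
--         if windows & words:
--             return False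
--     return True
-- ===== Notes on version B (the rewrite author's own statement) =====
-- stated objective: alternative
-- what changed: Inverts the traversal: instead of running a substring search over the URL for each of the 17 blacklist words, B groups the words by length once, then for each length collects every window of the URL of that length into a hash set and tests set intersection with that group.
import Mathlib
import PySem

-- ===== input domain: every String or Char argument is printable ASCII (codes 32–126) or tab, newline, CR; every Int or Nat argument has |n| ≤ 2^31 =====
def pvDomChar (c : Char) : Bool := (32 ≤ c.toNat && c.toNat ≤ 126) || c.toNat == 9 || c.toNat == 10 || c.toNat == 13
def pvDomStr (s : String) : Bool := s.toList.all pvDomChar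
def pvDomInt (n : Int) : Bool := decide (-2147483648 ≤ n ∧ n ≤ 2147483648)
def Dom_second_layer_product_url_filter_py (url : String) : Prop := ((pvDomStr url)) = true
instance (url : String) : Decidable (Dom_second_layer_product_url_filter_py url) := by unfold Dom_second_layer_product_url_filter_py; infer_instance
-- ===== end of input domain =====

-- B inverts the traversal: words grouped by length once, then for each length the URL's windows of
-- that length are collected into a set and intersected with the group; objective: alternative.

-- ===== PORT A =====
def pvFilterList : List String :=
  ["login", "signup", "account", "about-us",
   "about", "contact-us", "contact", "faq",
   "discount", "privacy", "payment", "policy",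
   "w3.org", ".jpg", ".png", ".webp", ".org"]

def second_layer_product_url_filter_py (url : String) : Bool :=
  let result := pvFilterList.filter (fun elem => PySem.Str.isIn elem url)
  if !result.isEmpty then false else true

-- ===== PORT B =====
-- by_len = {}; for w in _FILTER_WORDS: by_len.setdefault(len(w), set()).add(w)
def pvByLen : PySem.Dict Int (PySem.Set String) :=
  pvFilterList.foldl
    (fun d w =>
      d.insert ((PySem.Str.len w : Int))
        (PySem.Set.add (d.getD ((PySem.Str.len w : Int)) PySem.Set.empty) w))
    PySem.Dict.empty

-- the 'for length, words in by_len.items(): … return False' loop with its early return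
def second_layer_product_url_filter_py_alt (url : String) : Bool :=
  if pvByLen.items.any (fun p =>
      let windows : PySem.Set String :=
        PySem.Set.ofList ((PySem.List.pyRange 0 ((PySem.Str.len url : Int) - p.1 + 1) 1).map
          (fun i => PySem.Str.slice url (some i) (some (i + p.1))))
      !(PySem.Set.inter windows p.2).isEmpty)
  then false else true

-- ===== PRECONDITION & SPEC =====
def Spec_second_layer_product_url_filter_py (url : String) (out : Bool) : Prop := out = second_layer_product_url_filter_py_alt url
instance (url : String) (out : Bool) : Decidable (Spec_second_layer_product_url_filter_py url out) := by unfold Spec_second_layer_product_url_filter_py; infer_instance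

-- ===== CLAIM (what is proved, stated in full; the proofs are below) =====
def Claim_equal_second_layer_product_url_filter_py : Prop := ∀ (url : String), Dom_second_layer_product_url_filter_py url → Spec_second_layer_product_url_filter_py url (second_layer_product_url_filter_py url)

-- ===== LEMMAS AND PROOFS =====

theorem pvWindowList_iff (cs w : List Char) :
    (∃ i ∈ PySem.List.pyRange 0 ((cs.length:Int) - (w.length:Int) + 1) 1,
        PySem.List.slice cs (some i) (some (i + (w.length:Int))) = w) ↔ w <:+: cs := by
  constructor
  · rintro ⟨i, hmem, hs⟩
    rw [PySem.List.mem_pyRange_one] at hmem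
    obtain ⟨j, rfl⟩ := Int.eq_ofNat_of_zero_le hmem.1
    rw [PySem.List.slice_natCast_add] at hs
    exact List.infix_iff_prefix_suffix.mpr ⟨cs.drop j, hs ▸ List.take_prefix _ _, List.drop_suffix _ _⟩
  · intro h
    obtain ⟨s, t, hcat⟩ := h
    refine ⟨(s.length : Int), ?_, ?_⟩
    · rw [PySem.List.mem_pyRange_one]
      refine ⟨by positivity, ?_⟩
      have : cs.length = s.length + w.length + t.length := by rw [← hcat]; simp; omega
      omega
    · rw [PySem.List.slice_natCast_add, ← hcat]
      rw [List.append_assoc, List.drop_left, List.take_left]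

theorem pvGroup_iff (url : String) (L : Int) (ws : List String)
    (h : ∀ w ∈ ws, ((w.toList.length : Int) = L)) :
    ((!(PySem.Set.inter
        (PySem.Set.ofList ((PySem.List.pyRange 0 ((PySem.Str.len url : Int) - L + 1) 1).map
          (fun i => PySem.Str.slice url (some i) (some (i + L)))))
        ws).isEmpty) = true)
      ↔ ∃ w ∈ ws, w.toList <:+: url.toList := by
  rw [Bool.not_eq_true', List.isEmpty_eq_false_iff_exists_mem]
  constructor
  · rintro ⟨x, hx⟩
    rw [PySem.Set.mem_inter, PySem.Set.mem_ofList, List.mem_map] at hx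
    obtain ⟨⟨i, hi, hslice⟩, hxw⟩ := hx
    refine ⟨x, hxw, ?_⟩
    rw [← (h x hxw)] at hi hslice
    apply (pvWindowList_iff url.toList x.toList).mp
    refine ⟨i, ?_, ?_⟩
    · simpa using hi
    · have := congrArg String.toList hslice
      simpa using this
  · rintro ⟨w, hw, hinf⟩
    obtain ⟨i, hi, hslice⟩ := (pvWindowList_iff url.toList w.toList).mpr hinf
    refine ⟨w, ?_⟩
    rw [PySem.Set.mem_inter, PySem.Set.mem_ofList, List.mem_map]
    refine ⟨⟨i, ?_, ?_⟩, hw⟩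
    · rw [h w hw] at hi; simpa using hi
    · apply String.toList_injective
      rw [h w hw] at hslice
      simpa using hslice

theorem pvExistsGroups {P : String → Prop} (groups : List (Int × List String)) (all : List String)
    (h1 : ∀ p ∈ groups, ∀ w ∈ p.2, w ∈ all) (h2 : ∀ w ∈ all, ∃ p ∈ groups, w ∈ p.2) :
    (∃ p ∈ groups, ∃ w ∈ p.2, P w) ↔ ∃ w ∈ all, P w := by
  constructor
  · rintro ⟨p, hp, w, hw, hPw⟩
    exact ⟨w, h1 p hp w hw, hPw⟩
  · rintro ⟨w, hw, hPw⟩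
    obtain ⟨p, hp, hwp⟩ := h2 w hw
    exact ⟨p, hp, w, hwp, hPw⟩

theorem pvAlt_true_iff (url : String) :
    second_layer_product_url_filter_py_alt url = true
      ↔ ¬ ∃ w ∈ pvFilterList, w.toList <:+: url.toList := by
  have hlen : ∀ p ∈ pvByLen.items, ∀ w ∈ p.2, ((w.toList.length : Int) = p.1) := by decide
  have hm1 : ∀ p ∈ pvByLen.items, ∀ w ∈ p.2, w ∈ pvFilterList := by decide
  have hm2 : ∀ w ∈ pvFilterList, ∃ p ∈ pvByLen.items, w ∈ p.2 := by decide
  have key : (pvByLen.items.any (fun p =>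
      let windows : PySem.Set String :=
        PySem.Set.ofList ((PySem.List.pyRange 0 ((PySem.Str.len url : Int) - p.1 + 1) 1).map
          (fun i => PySem.Str.slice url (some i) (some (i + p.1))))
      !(PySem.Set.inter windows p.2).isEmpty)) = true
      ↔ ∃ w ∈ pvFilterList, w.toList <:+: url.toList := by
    rw [List.any_eq_true]
    refine Iff.trans ?_ (pvExistsGroups pvByLen.items pvFilterList hm1 hm2)
    exact exists_congr fun p => and_congr_right fun hp => pvGroup_iff url p.1 p.2 (hlen p hp)
  unfold second_layer_product_url_filter_py_alt
  rcases Bool.eq_false_or_eq_true (pvByLen.items.any (fun p =>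
      let windows : PySem.Set String :=
        PySem.Set.ofList ((PySem.List.pyRange 0 ((PySem.Str.len url : Int) - p.1 + 1) 1).map
          (fun i => PySem.Str.slice url (some i) (some (i + p.1))))
      !(PySem.Set.inter windows p.2).isEmpty)) with hb | hb
  · rw [hb]
    simp [key.mp hb]
  · rw [hb]
    simp only [Bool.false_eq_true, if_false, true_iff]
    rw [← key, hb]
    simp

theorem pvA_true_iff (url : String) :
    second_layer_product_url_filter_py url = true
      ↔ ¬ ∃ w ∈ pvFilterList, w.toList <:+: url.toList := by
  unfold second_layer_product_url_filter_py
  have hif : ∀ r : List String, (if !r.isEmpty then false else true) = r.isEmpty := by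
    intro r; cases r.isEmpty <;> rfl
  rw [hif]
  rw [List.isEmpty_iff, List.filter_eq_nil_iff]
  simp only [Bool.not_eq_true, PySem.Str.isIn_eq, PySem.Chars.isIn_eq_false_iff]
  constructor
  · rintro h ⟨w, hw, hi⟩
    exact h w hw hi
  · intro h w hw hi
    exact h ⟨w, hw, hi⟩

theorem second_layer_product_url_filter_py_eq_alt (url : String) :
    second_layer_product_url_filter_py url = second_layer_product_url_filter_py_alt url := by
  rw [Bool.eq_iff_iff, pvA_true_iff, pvAlt_true_iff]

-- ===== VERDICT (by name: the statement is the Claim_ definition above) =====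
theorem second_layer_product_url_filter_py_spec : Claim_equal_second_layer_product_url_filter_py := by
  intro url _
  exact second_layer_product_url_filter_py_eq_alt url
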